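-- pv_equiv track=rewrite | github.com/PoonLab/surfaces | scripts/sample_codons.py | transpose_fasta
-- ===== SOURCE A (Python) =====
-- def transpose_fasta(seqs, step=3):
--     """ Convert list of sequences to list of columns """
--     n_columns = len(seqs[0]) // step
--     columns = []
--     for i in range(n_columns):
--         l = step*i
--         r = l + step
--         columns.append([s[l:r] for s in seqs])
--     return columns
-- ===== SOURCE B (Python) =====
-- def transpose_fasta(seqs, step=3):
--     """ Convert list of sequences to list of columns """
--     n_columns = len(seqs[0]) // step
--     rows = [[s[step*i:step*i + step] for i in range(n_columns)] for s in seqs]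
--     return [list(col) for col in zip(*rows)]
-- ===== Notes on version B (the rewrite author's own statement) =====
-- stated objective: alternative
-- what changed: B builds a row-oriented table of codons per sequence and transposes it with zip(*rows), instead of A's column-by-column emission with an inner scan over all sequences per column.
import Mathlib
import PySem

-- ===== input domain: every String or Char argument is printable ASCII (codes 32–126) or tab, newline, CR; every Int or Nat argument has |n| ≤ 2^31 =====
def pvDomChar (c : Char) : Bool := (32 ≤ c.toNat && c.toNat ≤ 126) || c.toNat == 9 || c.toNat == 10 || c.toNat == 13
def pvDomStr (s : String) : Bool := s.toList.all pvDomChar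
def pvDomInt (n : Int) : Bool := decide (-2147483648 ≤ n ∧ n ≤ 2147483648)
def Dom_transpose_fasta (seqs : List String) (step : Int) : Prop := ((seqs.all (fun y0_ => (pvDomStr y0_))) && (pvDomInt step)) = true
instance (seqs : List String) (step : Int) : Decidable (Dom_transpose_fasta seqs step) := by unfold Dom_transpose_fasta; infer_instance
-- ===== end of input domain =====

-- B re-implements the transpose as a row-oriented codon table per sequence followed by a zip(*rows)-style transpose, instead of A's direct column-by-column emission; return value proved equal on nonempty seqs with step ≠ 0.


-- ===== PORT A =====
def transpose_fasta (seqs : List String) (step : Int) : List (List String) :=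
  match PySem.List.pyGet? seqs 0 with
  | none => []  -- seqs[0] IndexError: excluded by Pre_
  | some s0 =>
    if step = 0 then []  -- ZeroDivisionError: excluded by Pre_
    else
      let n_columns := PySem.Int.floordiv (PySem.Str.len s0) step
      (PySem.List.pyRange 0 n_columns 1).foldl
        (fun columns i =>
          let l := step * i
          let r := l + step
          columns ++ [seqs.map (fun s => PySem.Str.slice s (some l) (some r))]) []

-- ===== PORT B =====
-- zip(*rows): take heads of all rows while none is exhausted
def pvZipStar (rows : List (List String)) : List (List String) :=
  if h : rows = [] ∨ rows.any (·.isEmpty) = true then []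
  else (rows.map (fun r => r.headD "")) :: pvZipStar (rows.map List.tail)
termination_by (rows.headD []).length
decreasing_by
  simp only [not_or] at h
  obtain ⟨h1, h2⟩ := h
  cases rows with
  | nil => exact absurd rfl h1
  | cons r rs =>
    simp only [List.headD_cons]
    have hr : r ≠ [] := by
      intro he; apply h2; simp [he]
    have := List.length_pos_of_ne_nil hr
    simp [List.length_tail]
    omega

def transpose_fasta_alt (seqs : List String) (step : Int) : List (List String) :=
  match PySem.List.pyGet? seqs 0 with
  | none => []  -- seqs[0] IndexError: excluded by Pre_
  | some s0 =>
    if step = 0 then []  -- ZeroDivisionError: excluded by Pre_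
    else
      let n_columns := PySem.Int.floordiv (PySem.Str.len s0) step
      let rows := seqs.map (fun s =>
        (PySem.List.pyRange 0 n_columns 1).map
          (fun i => PySem.Str.slice s (some (step * i)) (some (step * i + step))))
      pvZipStar rows

-- ===== PRECONDITION & SPEC =====
-- A raises IndexError when seqs is empty and ZeroDivisionError when step is zero; Pre_ excludes exactly those inputs.
def Pre_transpose_fasta (seqs : List String) (step : Int) : Prop := seqs ≠ [] ∧ step ≠ 0
instance (seqs : List String) (step : Int) : Decidable (Pre_transpose_fasta seqs step) := by unfold Pre_transpose_fasta; infer_instance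
def pvWitness_transpose_fasta : List String × Int := (["ACGTGG", "TTACGA"], 3)

def Spec_transpose_fasta (seqs : List String) (step : Int) (out : List (List String)) : Prop := out = transpose_fasta_alt seqs step
instance (seqs : List String) (step : Int) (out : List (List String)) : Decidable (Spec_transpose_fasta seqs step out) := by unfold Spec_transpose_fasta; infer_instance

-- ===== CLAIM (what is proved, stated in full; the proofs are below) =====
def Claim_equal_transpose_fasta : Prop := ∀ (seqs : List String) (step : Int), Dom_transpose_fasta seqs step → Pre_transpose_fasta seqs step → Spec_transpose_fasta seqs step (transpose_fasta seqs step)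

-- ===== LEMMAS AND PROOFS =====

-- zip(*rows) of a rectangular table seqs × is of values g s i is the transposed table
theorem pvZipStar_map_map (is : List Int) (seqs : List String) (g : String → Int → String)
    (hne : seqs ≠ []) :
    pvZipStar (seqs.map (fun s => is.map (g s)))
      = is.map (fun i => seqs.map (fun s => g s i)) := by
  induction is with
  | nil =>
    rw [pvZipStar]
    cases seqs with
    | nil => exact absurd rfl hne
    | cons s ss => simp
  | cons i is' ih =>
    rw [pvZipStar]
    cases seqs with
    | nil => exact absurd rfl hne
    | cons s ss =>
      have hcond : ¬((((s :: ss).map (fun s => (i :: is').map (g s))) = []) ∨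
          (((s :: ss).map (fun s => (i :: is').map (g s))).any (·.isEmpty) = true)) := by
        simp
      rw [dif_neg hcond]
      simp only [Function.comp_def, List.map_cons, List.map_map, List.headD_cons, List.tail_cons]
      simp only [List.map_cons] at ih
      rw [ih]

-- ===== VERDICT (by name: the statement is the Claim_ definition above) =====
theorem transpose_fasta_spec : Claim_equal_transpose_fasta := by
  intro seqs step _ hpre
  obtain ⟨hne, hstep⟩ := hpre
  unfold Spec_transpose_fasta transpose_fasta transpose_fasta_alt
  cases seqs with
  | nil => exact absurd rfl hne
  | cons s ss =>
    simp only [PySem.List.pyGet?_zero_cons, if_neg hstep]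
    rw [pvZipStar_map_map _ _ (fun s i => PySem.Str.slice s (some (step * i)) (some (step * i + step))) (by simp)]
    rw [PySem.List.foldl_append_singleton_eq_map]
    simp
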